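-- pv_equiv track=rewrite | github.com/AncientAbysswalker/Euler-Project | Euler Projekt 019 - Counting Sundays/EulerProjekt_19.py | genDateDays
-- ===== SOURCE A (Python) =====
-- def genFebDays(year):
-- 	if year%4 == 0:
-- 		if year%100 == 0 and not year%400 == 0:
-- 			return 28
-- 		return 29
-- 	return 28
--
-- def genDateDays(year,day,string=False):
-- 	dayList=[31,genFebDays(year),31,30,31,30,31,31,30,31,30,31]
-- 	dayStr=['Sunday','Monday','Tuesday','Wednesday','Thursday','Friday','Saturday']
--
-- 	sucList=[day]
-- 	for i in range(0,12):
-- 		sucList.append((day+sum(dayList[0:i+1]))%7)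
--
-- 	if string==True:
-- 		return [dayStr[i] for i in sucList[:-1]],dayStr[sucList[-1]]
-- 	return sucList[:-1],sucList[-1]
-- ===== SOURCE B (Python) =====
-- # B: closed-form table of cumulative month offsets (constant except a leap shift
-- # from March on) instead of looping and re-summing prefix slices -- simpler, no loop.
-- def genDateDays(year, day, string=False):
--     leap = 1 if year % 4 == 0 and (year % 100 != 0 or year % 400 == 0) else 0
--     offs = [31, 59 + leap, 90 + leap, 120 + leap, 151 + leap, 181 + leap,
--             212 + leap, 243 + leap, 273 + leap, 304 + leap, 334 + leap]
--     starts = [day] + [(day + o) % 7 for o in offs]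
--     last = (day + 365 + leap) % 7
--     if string == True:
--         names = ['Sunday','Monday','Tuesday','Wednesday','Thursday','Friday','Saturday']
--         return [names[i] for i in starts], names[last]
--     return starts, last
-- ===== Notes on version B (the rewrite author's own statement) =====
-- stated objective: simpler
-- what changed: B drops A's loop that re-sums a prefix slice of month lengths for each month and instead uses a precomputed closed-form table of cumulative offsets (constant except for a leap-year shift from March on), mapping each offset to (day+offset)%7.
import Mathlib
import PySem

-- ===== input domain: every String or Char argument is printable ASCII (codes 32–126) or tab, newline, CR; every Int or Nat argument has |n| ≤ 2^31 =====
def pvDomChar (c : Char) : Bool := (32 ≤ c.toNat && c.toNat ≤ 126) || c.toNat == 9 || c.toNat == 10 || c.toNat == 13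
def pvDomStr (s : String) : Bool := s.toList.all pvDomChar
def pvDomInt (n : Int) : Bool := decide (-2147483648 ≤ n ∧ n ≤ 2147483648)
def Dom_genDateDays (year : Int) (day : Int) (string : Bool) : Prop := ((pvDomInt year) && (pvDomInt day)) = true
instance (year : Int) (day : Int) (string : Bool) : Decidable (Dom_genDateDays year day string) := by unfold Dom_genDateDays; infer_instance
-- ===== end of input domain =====

-- B replaces A's loop that re-sums a prefix slice per month with a closed-form table
-- of cumulative offsets shifted by a leap flag (simpler, no loop); string=False only (see Pre_).

-- ===== PORT A =====
def genFebDays (year : Int) : Int :=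
  if PySem.Int.mod year 4 = 0 then
    (if PySem.Int.mod year 100 = 0 ∧ ¬ PySem.Int.mod year 400 = 0 then 28 else 29)
  else 28

def genDateDays (year : Int) (day : Int) (string : Bool) : List Int × Int :=
  let dayList : List Int := [31, genFebDays year, 31, 30, 31, 30, 31, 31, 30, 31, 30, 31]
  let sucList : List Int := (PySem.List.pyRange 0 12 1).foldl
      (fun acc i => acc ++ [PySem.Int.mod (day + (PySem.List.slice dayList (some 0) (some (i+1))).sum) 7])
      [day]
  -- the string==True branch returns weekday NAMES (list[str]), outside the declared
  -- return type List Int × Int; those inputs are excluded by Pre_genDateDays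
  (PySem.List.slice sucList none (some (-1)), (PySem.List.pyGet? sucList (-1)).getD 0)

-- ===== PORT B =====
def genDateDays_alt (year : Int) (day : Int) (string : Bool) : List Int × Int :=
  let leap : Int :=
    if PySem.Int.mod year 4 = 0 ∧ (¬ PySem.Int.mod year 100 = 0 ∨ PySem.Int.mod year 400 = 0) then 1 else 0
  let offs : List Int := [31, 59 + leap, 90 + leap, 120 + leap, 151 + leap, 181 + leap,
                          212 + leap, 243 + leap, 273 + leap, 304 + leap, 334 + leap]
  let starts : List Int := day :: offs.map (fun o => PySem.Int.mod (day + o) 7)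
  -- the string==True branch (names) is outside the declared type; excluded by Pre_genDateDays
  (starts, PySem.Int.mod (day + 365 + leap) 7)

-- ===== PRECONDITION & SPEC =====
-- Pre_ excludes string=True: there A returns weekday names (list[str], str), not a
-- value of the declared type List Int × Int (and raises IndexError when day is out
-- of range of the 7-name table).
def Pre_genDateDays (year : Int) (day : Int) (string : Bool) : Prop := string = false
instance (year : Int) (day : Int) (string : Bool) : Decidable (Pre_genDateDays year day string) := by unfold Pre_genDateDays; infer_instance

def pvWitness_genDateDays : Int × Int × Bool := (2000, 3, false)

def Spec_genDateDays (year : Int) (day : Int) (string : Bool) (out : List Int × Int) : Prop := out = genDateDays_alt year day string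
instance (year : Int) (day : Int) (string : Bool) (out : List Int × Int) : Decidable (Spec_genDateDays year day string out) := by unfold Spec_genDateDays; infer_instance

-- ===== CLAIM (what is proved, stated in full; the proofs are below) =====
def Claim_equal_genDateDays : Prop := ∀ (year : Int) (day : Int) (string : Bool), Dom_genDateDays year day string → Pre_genDateDays year day string → Spec_genDateDays year day string (genDateDays year day string)

-- ===== LEMMAS AND PROOFS =====
-- B's leap flag: February length in A is 28 plus this flag.
def pvLeap (year : Int) : Int :=
  if PySem.Int.mod year 4 = 0 ∧ (¬ PySem.Int.mod year 100 = 0 ∨ PySem.Int.mod year 400 = 0) then 1 else 0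

theorem febDays_eq_leap (year : Int) : genFebDays year = 28 + pvLeap year := by
  unfold genFebDays pvLeap
  by_cases h4 : (4:Int) ∣ year <;>
    by_cases h100 : (100:Int) ∣ year <;>
      by_cases h400 : (400:Int) ∣ year <;>
        simp [PySem.Int.mod_eq_zero_iff_dvd, h4, h100, h400]

theorem core_eq (L day : Int) :
    (PySem.List.slice ((PySem.List.pyRange 0 12 1).foldl
        (fun acc i => acc ++ [PySem.Int.mod (day + (PySem.List.slice ([31, 28 + L, 31, 30, 31, 30, 31, 31, 30, 31, 30, 31] : List Int) (some 0) (some (i+1))).sum) 7])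
        [day]) none (some (-1)),
     (PySem.List.pyGet? ((PySem.List.pyRange 0 12 1).foldl
        (fun acc i => acc ++ [PySem.Int.mod (day + (PySem.List.slice ([31, 28 + L, 31, 30, 31, 30, 31, 31, 30, 31, 30, 31] : List Int) (some 0) (some (i+1))).sum) 7])
        [day]) (-1)).getD 0)
    =
    (day :: ([31, 59 + L, 90 + L, 120 + L, 151 + L, 181 + L, 212 + L, 243 + L, 273 + L, 304 + L, 334 + L] : List Int).map (fun o => PySem.Int.mod (day + o) 7),
     PySem.Int.mod (day + 365 + L) 7) := by
  have hr : PySem.List.pyRange 0 12 1 = [0,1,2,3,4,5,6,7,8,9,10,11] := by decide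
  rw [hr]
  simp only [List.foldl, List.map, PySem.List.slice_to_neg_one]
  norm_num [PySem.List.slice, PySem.List.clampIdx, PySem.List.pyGet?, PySem.List.pyIdx?]
  simp only [show Int.toNat 2 = 2 from rfl, show Int.toNat 3 = 3 from rfl,
    show Int.toNat 4 = 4 from rfl, show Int.toNat 5 = 5 from rfl,
    show Int.toNat 6 = 6 from rfl, show Int.toNat 7 = 7 from rfl,
    show Int.toNat 8 = 8 from rfl, show Int.toNat 9 = 9 from rfl,
    show Int.toNat 10 = 10 from rfl, show Int.toNat 11 = 11 from rfl,
    show Int.toNat 12 = 12 from rfl]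
  norm_num [List.take_add_one]
  constructor <;> [skip; ring_nf]
  refine ⟨?_,?_,?_,?_,?_,?_,?_,?_,?_,?_⟩ <;> ring_nf

theorem genDateDays_eq_alt (year day : Int) (string : Bool) :
    genDateDays year day string = genDateDays_alt year day string := by
  unfold genDateDays genDateDays_alt
  rw [febDays_eq_leap]
  exact core_eq (pvLeap year) day

-- ===== VERDICT (by name: the statement is the Claim_ definition above) =====
theorem genDateDays_spec : Claim_equal_genDateDays := by
  intro year day string _ _
  unfold Spec_genDateDays
  exact genDateDays_eq_alt year day string
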